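-- pv_equiv track=rewrite | github.com/ayushsigroha123/health-tracker | health-tracker.py | g1
-- ===== SOURCE A (Python) =====
-- def g1(b, a):
--     for i in range(2):
--         bb = b
--     if b < 18.5:
--         x = "Yoga, Walking, Swimming"
--         for j in range(3):
--             xx = x
--         return x
--     elif b < 24.9:
--         x = "Running, Cycling, Team Sports"
--         for k in range(3):
--             xx = x
--         return x
--     elif b < 29.9:
--         x = "Brisk Walking, Swimming, Aerobics"
--         for l in range(3):
--             xx = x
--         return x
--     else:
--         x = "Low-impact Cardio, Water Aerobics, Walking"
--         for m in range(3):
--             xx = x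
--         return x
-- ===== SOURCE B (Python) =====
-- RECS = ["Yoga, Walking, Swimming",
--         "Running, Cycling, Team Sports",
--         "Brisk Walking, Swimming, Aerobics",
--         "Low-impact Cardio, Water Aerobics, Walking"]
--
-- def g1(b, a):
--     # index = number of thresholds already reached; direct table index, no branching
--     idx = (b >= 18.5) + (b >= 24.9) + (b >= 29.9)
--     return RECS[idx]
-- ===== Notes on version B (the rewrite author's own statement) =====
-- stated objective: idiomatic
-- what changed: Replaces the if-elif branch chain (with its dead no-op loops) by branch-free arithmetic: the answer index is computed as the count of thresholds b has reached and used to index a fixed list directly.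
import Mathlib
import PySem

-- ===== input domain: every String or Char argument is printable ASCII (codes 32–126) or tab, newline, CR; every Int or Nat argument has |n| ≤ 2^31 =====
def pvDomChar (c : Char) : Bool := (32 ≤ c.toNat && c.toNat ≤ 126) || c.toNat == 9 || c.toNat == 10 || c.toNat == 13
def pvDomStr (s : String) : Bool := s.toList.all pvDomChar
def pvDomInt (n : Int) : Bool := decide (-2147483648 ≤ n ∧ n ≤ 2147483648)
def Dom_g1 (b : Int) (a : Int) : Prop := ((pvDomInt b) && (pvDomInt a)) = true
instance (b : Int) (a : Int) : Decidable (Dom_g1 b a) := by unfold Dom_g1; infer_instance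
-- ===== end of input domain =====

-- B replaces A's if-elif chain (with its dead no-op loops) by branch-free arithmetic:
-- the answer index = count of thresholds reached, used to index a fixed list. Idiomatic/alternative form.


-- ===== PORT A =====
-- A's loops 'for i in range(2): bb = b' etc. only rebind dead locals; they are ported
-- as folds carrying the same (unused) value. For integer b, the Python comparison
-- b < 18.5 is exactly b ≤ 18 (likewise 24.9 ↦ ≤ 24, 29.9 ↦ ≤ 29): exact on Int inputs.
def g1 (b : Int) (a : Int) : String :=
  let _bb := (PySem.List.pyRange 0 2 1).foldl (fun _ _ => b) b
  if b ≤ 18 then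
    let x := "Yoga, Walking, Swimming"
    let _xx := (PySem.List.pyRange 0 3 1).foldl (fun _ _ => x) x
    x
  else if b ≤ 24 then
    let x := "Running, Cycling, Team Sports"
    let _xx := (PySem.List.pyRange 0 3 1).foldl (fun _ _ => x) x
    x
  else if b ≤ 29 then
    let x := "Brisk Walking, Swimming, Aerobics"
    let _xx := (PySem.List.pyRange 0 3 1).foldl (fun _ _ => x) x
    x
  else
    let x := "Low-impact Cardio, Water Aerobics, Walking"
    let _xx := (PySem.List.pyRange 0 3 1).foldl (fun _ _ => x) x
    x

-- ===== PORT B =====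
-- B's module constant RECS.
def RECS : List String :=
  ["Yoga, Walking, Swimming",
   "Running, Cycling, Team Sports",
   "Brisk Walking, Swimming, Aerobics",
   "Low-impact Cardio, Water Aerobics, Walking"]

-- Python bool addition: True+False counts; b >= 18.5 for integer b is exactly b ≥ 19
-- (24.9 ↦ ≥ 25, 29.9 ↦ ≥ 30). RECS[idx] is Python list indexing (pyGet?), idx ∈ [0,3].
def g1_alt (b : Int) (a : Int) : String :=
  let idx : Int := (if b ≥ 19 then 1 else 0) + (if b ≥ 25 then 1 else 0) + (if b ≥ 30 then 1 else 0)
  (PySem.List.pyGet? RECS idx).getD ""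

-- ===== PRECONDITION & SPEC =====
def Spec_g1 (b : Int) (a : Int) (out : String) : Prop := out = g1_alt b a
instance (b : Int) (a : Int) (out : String) : Decidable (Spec_g1 b a out) := by unfold Spec_g1; infer_instance

-- ===== CLAIM (what is proved, stated in full; the proofs are below) =====
def Claim_equal_g1 : Prop := ∀ (b : Int) (a : Int), Dom_g1 b a → Spec_g1 b a (g1 b a)

-- ===== LEMMAS AND PROOFS =====

-- ===== VERDICT (by name: the statement is the Claim_ definition above) =====
theorem g1_spec : Claim_equal_g1 := by
  intro b a _
  unfold Spec_g1 g1 g1_alt RECS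
  have e1 : (19 ≤ b) ↔ ¬ b ≤ 18 := by omega
  have e2 : (25 ≤ b) ↔ ¬ b ≤ 24 := by omega
  have e3 : (30 ≤ b) ↔ ¬ b ≤ 29 := by omega
  by_cases h1 : b ≤ 18 <;> by_cases h2 : b ≤ 24 <;> by_cases h3 : b ≤ 29 <;>
    simp [h1, h2, h3, e1, e2, e3, PySem.List.pyGet?, PySem.List.pyIdx?] <;> omega
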